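-- pv_equiv track=rewrite | github.com/qzheng527/occlum | demos/AntGLMInference/antnlp/solutions/antllm/examples/sft/train_atorch.py | find_best_train_batch_size
-- ===== SOURCE A (Python) =====
-- BEST_TRAIN_BATCH_SIZE_MAP = {
--     8: 7,
--     16: 8,
--     32: 9,
--     64: 9,
--     128: 11,
--     256: 12
-- }
--
-- def find_best_train_batch_size(world_size):
--     sorted_map = sorted(BEST_TRAIN_BATCH_SIZE_MAP.items(), key=lambda x: x[0])
--     best_batch_size = 1
--     for conf in sorted_map:
--         if world_size < conf[0]:
--             break
--         best_batch_size = conf[1]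
--     return best_batch_size
-- ===== SOURCE B (Python) =====
-- import bisect
--
-- _KEYS = [8, 16, 32, 64, 128, 256]
-- _VALS = [7, 8, 9, 9, 11, 12]
--
-- def find_best_train_batch_size(world_size):
--     idx = bisect.bisect_right(_KEYS, world_size) - 1
--     if idx < 0:
--         return 1
--     return _VALS[idx]
-- ===== Notes on version B (the rewrite author's own statement) =====
-- stated objective: alternative
-- what changed: Replace the linear scan over the sorted (key,value) pairs with a running best by a single bisect_right binary search on a static sorted key list, indexing a parallel value list.
import Mathlib
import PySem

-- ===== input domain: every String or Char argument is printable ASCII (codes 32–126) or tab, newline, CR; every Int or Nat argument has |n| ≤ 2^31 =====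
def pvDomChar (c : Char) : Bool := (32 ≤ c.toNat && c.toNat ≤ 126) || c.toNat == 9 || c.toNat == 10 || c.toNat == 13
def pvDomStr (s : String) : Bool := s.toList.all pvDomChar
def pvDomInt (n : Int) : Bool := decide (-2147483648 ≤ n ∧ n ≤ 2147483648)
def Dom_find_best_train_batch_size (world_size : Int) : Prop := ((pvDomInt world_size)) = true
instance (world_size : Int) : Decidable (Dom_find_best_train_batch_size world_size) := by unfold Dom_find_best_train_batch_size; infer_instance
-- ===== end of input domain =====

-- B replaces A's per-call sort + linear scan with a bisect_right binary search on a static sorted key list (alternative decomposition, same results).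


-- ===== PORT A =====
-- A: sort the map items by key, linear scan keeping the last value whose key <= world_size.
def pvALoop (ws : Int) : List (Int × Int) → Int → Int
  | [], best => best
  | conf :: rest, best => if ws < conf.1 then best else pvALoop ws rest conf.2

def find_best_train_batch_size (world_size : Int) : Int :=
  let sorted_map := PySem.List.sorted
    [((8:Int),(7:Int)),(16,8),(32,9),(64,9),(128,11),(256,12)] (fun x => x.1) false
  pvALoop world_size sorted_map 1

-- ===== PORT B =====
-- B: bisect_right binary search over a static sorted key list, parallel value list.
def pvBKeys : List Int := [8, 16, 32, 64, 128, 256]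
def pvBVals : List Int := [7, 8, 9, 9, 11, 12]

-- bisect.bisect_right(a, x) with lo=0, hi=len(a): standard while lo<hi loop.
def pvBisectRight (a : List Int) (x : Int) (lo hi : Nat) : Nat :=
  if _h : lo < hi then
    let mid := (lo + hi) / 2
    if x < a.getD mid 0 then pvBisectRight a x lo mid
    else pvBisectRight a x (mid + 1) hi
  else lo
termination_by hi - lo
decreasing_by all_goals omega

def find_best_train_batch_size_alt (world_size : Int) : Int :=
  let idx : Int := (pvBisectRight pvBKeys world_size 0 pvBKeys.length : Int) - 1
  if idx < 0 then 1 else pvBVals.getD idx.toNat 1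

-- ===== PRECONDITION & SPEC =====
def Spec_find_best_train_batch_size (world_size : Int) (out : Int) : Prop := out = find_best_train_batch_size_alt world_size
instance (world_size : Int) (out : Int) : Decidable (Spec_find_best_train_batch_size world_size out) := by unfold Spec_find_best_train_batch_size; infer_instance

-- ===== CLAIM (what is proved, stated in full; the proofs are below) =====
def Claim_equal_find_best_train_batch_size : Prop := ∀ (world_size : Int), Dom_find_best_train_batch_size world_size → Spec_find_best_train_batch_size world_size (find_best_train_batch_size world_size)

-- ===== LEMMAS AND PROOFS =====

-- ===== VERDICT (by name: the statement is the Claim_ definition above) =====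
theorem find_best_train_batch_size_spec : Claim_equal_find_best_train_batch_size := by
  intro ws _
  unfold Spec_find_best_train_batch_size find_best_train_batch_size find_best_train_batch_size_alt
  have hs : PySem.List.sorted
      [((8:Int),(7:Int)),(16,8),(32,9),(64,9),(128,11),(256,12)] (fun x => x.1) false
      = [((8:Int),(7:Int)),(16,8),(32,9),(64,9),(128,11),(256,12)] := by decide
  rw [hs]
  by_cases h1 : ws < 8
  · simp [pvALoop, pvBisectRight, pvBKeys, pvBVals, h1] <;> split_ifs <;> simp_all <;> omega
  · by_cases h2 : ws < 16
    · simp [pvALoop, pvBisectRight, pvBKeys, pvBVals, h1, h2] <;> split_ifs <;> simp_all <;> omega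
    · by_cases h3 : ws < 32
      · simp [pvALoop, pvBisectRight, pvBKeys, pvBVals, h1, h2, h3] <;> split_ifs <;> simp_all <;> omega
      · by_cases h4 : ws < 64
        · simp [pvALoop, pvBisectRight, pvBKeys, pvBVals, h1, h2, h3, h4] <;> split_ifs <;> simp_all <;> omega
        · by_cases h5 : ws < 128
          · simp [pvALoop, pvBisectRight, pvBKeys, pvBVals, h1, h2, h3, h4, h5] <;> split_ifs <;> simp_all <;> omega
          · by_cases h6 : ws < 256
            · simp [pvALoop, pvBisectRight, pvBKeys, pvBVals, h1, h2, h3, h4, h5, h6] <;> split_ifs <;> simp_all <;> omega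
            · simp [pvALoop, pvBisectRight, pvBKeys, pvBVals, h1, h2, h3, h4, h5, h6] <;> split_ifs <;> simp_all <;> omega
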